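-- pv_equiv track=rewrite | github.com/Aakash192/FB_Bot_Langchain | docx_rag_pipeline.py | _extract_fee_info_from_row
-- ===== SOURCE A (Python) =====
-- from typing import List, Dict, Any, Optional, Tuple
--
-- def _extract_fee_info_from_row(row: List[str], headers: List[str]) -> Dict[str, Any]:
--     """
--     Extract fee information from a table row.
--
--     Args:
--         row: Table row data (list of cell values)
--         headers: Table column headers
--
--     Returns:
--         Dictionary with fee_name, fee_amount, and other extracted info
--     """
--     fee_info = {
--         'fee_name': None,
--         'fee_amount': None,
--         'fee_description': None
--     }
--
--     if not row or not headers: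
--         return fee_info
--
--     # Common fee-related column names
--     fee_name_keywords = ['fee', 'type', 'name', 'description', 'item']
--     amount_keywords = ['amount', 'fee', 'rate', 'percentage', '%', 'cost', 'price']
--
--     # Try to find fee name (usually first column or column with "fee"/"type" in header)
--     for i, header in enumerate(headers):
--         header_lower = str(header).lower()
--         if i < len(row) and row[i]:
--             cell_value = str(row[i]).strip()
--
--             # Check if this column contains the fee name
--             if any(keyword in header_lower for keyword in fee_name_keywords):
--                 if not fee_info['fee_name'] and cell_value:
--                     fee_info['fee_name'] = cell_value
--
--             # Check if this column contains the amount/rate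
--             if any(keyword in header_lower for keyword in amount_keywords):
--                 if not fee_info['fee_amount'] and cell_value:
--                     fee_info['fee_amount'] = cell_value
--
--     # If fee_name not found, use first non-empty cell
--     if not fee_info['fee_name']:
--         for cell in row:
--             if cell and str(cell).strip():
--                 fee_info['fee_name'] = str(cell).strip()
--                 break
--
--     # If fee_amount not found, look for percentage signs or dollar signs
--     if not fee_info['fee_amount']:
--         for cell in row:
--             cell_str = str(cell).strip()
--             if '%' in cell_str or '$' in cell_str or any(char.isdigit() for char in cell_str):
--                 fee_info['fee_amount'] = cell_str
--                 break
--
--     # Build full description from all non-empty cells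
--     description_parts = []
--     for i, cell in enumerate(row):
--         if cell and str(cell).strip():
--             if headers and i < len(headers):
--                 description_parts.append(f"{headers[i]}: {cell}")
--             else:
--                 description_parts.append(str(cell))
--
--     fee_info['fee_description'] = " | ".join(description_parts)
--
--     return fee_info
-- ===== SOURCE B (Python) =====
-- def _extract_fee_info_from_row(row, headers):
--     if not row or not headers:
--         return {'fee_name': None, 'fee_amount': None, 'fee_description': None}
--
--     name_kw = ('fee', 'type', 'name', 'description', 'item')
--     amount_kw = ('amount', 'fee', 'rate', 'percentage', '%', 'cost', 'price')
--
--     # one fused pass over the row: five accumulator slots instead of four staged loops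
--     hname = hamt = fbname = fbamt = None
--     parts = []
--     for i, cell in enumerate(row):
--         s = str(cell).strip()
--         if s and i < len(headers):
--             h = str(headers[i]).lower()
--             if hname is None and any(k in h for k in name_kw):
--                 hname = s
--             if hamt is None and any(k in h for k in amount_kw):
--                 hamt = s
--         if fbname is None and s:
--             fbname = s
--         if fbamt is None and ('%' in s or '$' in s or any(ch.isdigit() for ch in s)):
--             fbamt = s
--         if s:
--             parts.append(f"{headers[i]}: {cell}" if i < len(headers) else str(cell))
--
--     return {'fee_name': hname if hname is not None else fbname,
--             'fee_amount': hamt if hamt is not None else fbamt,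
--             'fee_description': " | ".join(parts)}
-- ===== Notes on version B (the rewrite author's own statement) =====
-- stated objective: alternative
-- what changed: A's four staged loops (a header-indexed scan filling two slots, two separate fallback scans over the row, and a description loop) are replaced by ONE fused pass over the row with a five-field accumulator (header-name, header-amount, fallback-name, fallback-amount, description parts) that is assembled into the result at the end.
import Mathlib
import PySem

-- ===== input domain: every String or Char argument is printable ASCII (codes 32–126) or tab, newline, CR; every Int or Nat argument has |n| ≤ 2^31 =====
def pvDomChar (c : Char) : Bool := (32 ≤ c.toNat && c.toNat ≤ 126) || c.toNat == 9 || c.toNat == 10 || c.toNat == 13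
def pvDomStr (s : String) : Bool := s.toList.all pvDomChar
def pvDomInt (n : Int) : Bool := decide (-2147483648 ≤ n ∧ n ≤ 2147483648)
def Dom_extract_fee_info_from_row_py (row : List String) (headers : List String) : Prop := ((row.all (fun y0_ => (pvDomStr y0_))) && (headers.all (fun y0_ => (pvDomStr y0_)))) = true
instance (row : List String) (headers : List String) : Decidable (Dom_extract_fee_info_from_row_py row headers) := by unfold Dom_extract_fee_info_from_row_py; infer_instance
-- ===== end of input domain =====

-- B replaces A's four staged loops by ONE fused pass over the row carrying a five-field
-- accumulator (objective: alternative decomposition). Return values agree everywhere.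

-- shared constants (the two keyword lists from the Python source)
def pvNameKw : List String := ["fee", "type", "name", "description", "item"]
def pvAmtKw : List String := ["amount", "fee", "rate", "percentage", "%", "cost", "price"]
-- Python truthiness of a string / of an Optional[str]
def pvNE (s : String) : Bool := !s.toList.isEmpty
def pvTruthyO (o : Option String) : Bool := o.elim false pvNE

-- ===== PORT A =====
-- the body of A's single header loop: state = (fee_name, fee_amount)
def pvStepA (row : List String) (st : Option String × Option String) (p : Int × String) :
    Option String × Option String :=
  let hl := PySem.Str.lower p.2
  if decide (p.1 < (row.length : Int)) && pvNE (PySem.List.pyGetD row p.1 "") then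
    let cv := PySem.Str.strip (PySem.List.pyGetD row p.1 "")
    let st1 := if pvNameKw.any (fun k => PySem.Str.isIn k hl) then
                 (if !pvTruthyO st.1 && pvNE cv then (some cv, st.2) else st)
               else st
    if pvAmtKw.any (fun k => PySem.Str.isIn k hl) then
      (if !pvTruthyO st1.2 && pvNE cv then (st1.1, some cv) else st1)
    else st1
  else st

-- A's first fallback loop (first non-empty cell), with break
def pvFindNameA : List String → Option String
  | [] => none
  | c :: rest =>
      if pvNE c && pvNE (PySem.Str.strip c) then some (PySem.Str.strip c) else pvFindNameA rest

-- A's second fallback loop ('%' / '$' / digit), with break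
def pvFindAmtA : List String → Option String
  | [] => none
  | c :: rest =>
      let cs := PySem.Str.strip c
      if PySem.Str.isIn "%" cs || PySem.Str.isIn "$" cs || cs.toList.any PySem.Chars.isdigit then
        some cs
      else pvFindAmtA rest

-- A's description accumulator loop
def pvDescA (headers : List String) (row : List String) : List String :=
  (PySem.List.enumerate row 0).foldl (fun acc p =>
    if pvNE p.2 && pvNE (PySem.Str.strip p.2) then
      acc ++ [if !headers.isEmpty && decide (p.1 < (headers.length : Int)) then
                PySem.Str.join "" [PySem.List.pyGetD headers p.1 "", ": ", p.2]
              else p.2]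
    else acc) []

def extract_fee_info_from_row_py (row : List String) (headers : List String) :
    List (String × Option String) :=
  if row.isEmpty || headers.isEmpty then
    [("fee_name", none), ("fee_amount", none), ("fee_description", none)]
  else
    let st := (PySem.List.enumerate headers 0).foldl (pvStepA row) (none, none)
    let fname := if pvTruthyO st.1 then st.1 else pvFindNameA row
    let famt := if pvTruthyO st.2 then st.2 else pvFindAmtA row
    [("fee_name", fname), ("fee_amount", famt),
     ("fee_description", some (PySem.Str.join " | " (pvDescA headers row)))]

-- ===== PORT B =====
-- the loop body of Source B's single fused pass; state = (hname, hamt, fbname, fbamt, parts)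
def pvStepB (headers : List String)
    (st : Option String × Option String × Option String × Option String × List String)
    (p : Int × String) :
    Option String × Option String × Option String × Option String × List String :=
  match st with
  | (hn, ha, fn, fa, parts) =>
    let s := PySem.Str.strip p.2
    let hna := if pvNE s && decide (p.1 < (headers.length : Int)) then
        let h := PySem.Str.lower (PySem.List.pyGetD headers p.1 "")
        let hn1 := if hn.isNone && pvNameKw.any (fun k => PySem.Str.isIn k h) then some s else hn
        let ha1 := if ha.isNone && pvAmtKw.any (fun k => PySem.Str.isIn k h) then some s else ha
        (hn1, ha1)
      else (hn, ha)
    let fn1 := if fn.isNone && pvNE s then some s else fn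
    let fa1 := if fa.isNone && (PySem.Str.isIn "%" s || PySem.Str.isIn "$" s ||
                  s.toList.any PySem.Chars.isdigit) then some s else fa
    let parts1 := if pvNE s then
        parts ++ [if decide (p.1 < (headers.length : Int)) then
                    PySem.Str.join "" [PySem.List.pyGetD headers p.1 "", ": ", p.2]
                  else p.2]
      else parts
    (hna.1, hna.2, fn1, fa1, parts1)

def extract_fee_info_from_row_py_alt (row : List String) (headers : List String) :
    List (String × Option String) :=
  if row.isEmpty || headers.isEmpty then
    [("fee_name", none), ("fee_amount", none), ("fee_description", none)]
  else
    let st := (PySem.List.enumerate row 0).foldl (pvStepB headers) (none, none, none, none, [])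
    [("fee_name", if st.1.isSome then st.1 else st.2.2.1),
     ("fee_amount", if st.2.1.isSome then st.2.1 else st.2.2.2.1),
     ("fee_description", some (PySem.Str.join " | " st.2.2.2.2))]

-- ===== PRECONDITION & SPEC =====
def Spec_extract_fee_info_from_row_py (row : List String) (headers : List String) (out : List (String × Option String)) : Prop := out = extract_fee_info_from_row_py_alt row headers
instance (row : List String) (headers : List String) (out : List (String × Option String)) : Decidable (Spec_extract_fee_info_from_row_py row headers out) := by unfold Spec_extract_fee_info_from_row_py; infer_instance

-- ===== CLAIM (what is proved, stated in full; the proofs are below) =====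
def Claim_equal_extract_fee_info_from_row_py : Prop := ∀ (row : List String) (headers : List String), Dom_extract_fee_info_from_row_py row headers → Spec_extract_fee_info_from_row_py row headers (extract_fee_info_from_row_py row headers)

-- ===== LEMMAS AND PROOFS =====

-- A-side header-loop condition for one column (i, header)
def pvCondB (row : List String) (kws : List String) (p : Int × String) : Bool :=
  decide (p.1 < (row.length : Int)) && pvNE (PySem.List.pyGetD row p.1 "") &&
  kws.any (fun k => PySem.Str.isIn k (PySem.Str.lower p.2)) &&
  pvNE (PySem.Str.strip (PySem.List.pyGetD row p.1 ""))

-- B-side header-candidate condition for one cell (i, cell)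
def pvCondB' (headers : List String) (kws : List String) (p : Int × String) : Bool :=
  pvNE (PySem.Str.strip p.2) && decide (p.1 < (headers.length : Int)) &&
  kws.any (fun k => PySem.Str.isIn k (PySem.Str.lower (PySem.List.pyGetD headers p.1 "")))

-- common denominator: parallel walk over row and headers, first matching column
def pvWalk (kws : List String) : List String → List String → Option String
  | _, [] => none
  | [], _ :: _ => none
  | c :: rt, h :: ht =>
      if pvNE (PySem.Str.strip c) &&
         kws.any (fun k => PySem.Str.isIn k (PySem.Str.lower h)) then
        some (PySem.Str.strip c)
      else pvWalk kws rt ht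

-- "set slot if unset" single-slot step (A side, truthiness flavour)
def pvG (row : List String) (kws : List String) (o : Option String) (p : Int × String) :
    Option String :=
  if pvCondB row kws p && !pvTruthyO o then
    some (PySem.Str.strip (PySem.List.pyGetD row p.1 "")) else o

theorem pvStepA_eq (row : List String) (st : Option String × Option String) (p : Int × String) :
    pvStepA row st p = (pvG row pvNameKw st.1 p, pvG row pvAmtKw st.2 p) := by
  cases hg : (decide (p.1 < (row.length : Int)) && pvNE (PySem.List.pyGetD row p.1 "")) <;>
  cases hn : pvNameKw.any (fun k => PySem.Str.isIn k (PySem.Str.lower p.2)) <;>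
  cases ha : pvAmtKw.any (fun k => PySem.Str.isIn k (PySem.Str.lower p.2)) <;>
  cases hs : pvNE (PySem.Str.strip (PySem.List.pyGetD row p.1 "")) <;>
  cases h1 : pvTruthyO st.1 <;>
  cases h2 : pvTruthyO st.2 <;>
  simp only [pvStepA, pvG, pvCondB, hg, hn, ha, hs, h1, h2, Bool.and_false, Bool.and_true,
    Bool.not_true, Bool.not_false, if_true, if_false, Bool.false_eq_true, Bool.and_self]

theorem pvFoldlFunext {α β : Type} (f g : α → β → α) (l : List β) (a : α)
    (h : ∀ a b, f a b = g a b) : l.foldl f a = l.foldl g a := by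
  induction l generalizing a with
  | nil => rfl
  | cons x t ih => simp only [List.foldl_cons, h]; exact ih _

theorem foldl_pair {α β γ : Type} (f : α → γ → α) (g : β → γ → β) (l : List γ) (a : α) (b : β) :
    l.foldl (fun st p => (f st.1 p, g st.2 p)) (a, b) = (l.foldl f a, l.foldl g b) := by
  induction l generalizing a b with
  | nil => rfl
  | cons x t ih => simp [List.foldl_cons, ih]

theorem pvG_frozen (row : List String) (kws : List String) (l : List (Int × String))
    (o : Option String) (h : pvTruthyO o = true) : l.foldl (pvG row kws) o = o := by
  induction l with
  | nil => rfl
  | cons x t ih => simp [List.foldl_cons, pvG, h, ih]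

theorem pvG_find (row : List String) (kws : List String) (l : List (Int × String)) :
    l.foldl (pvG row kws) none =
      (l.find? (pvCondB row kws)).map (fun p => PySem.Str.strip (PySem.List.pyGetD row p.1 "")) := by
  induction l with
  | nil => rfl
  | cons x t ih =>
    by_cases hc : pvCondB row kws x = true
    · have hne : pvNE (PySem.Str.strip (PySem.List.pyGetD row x.1 "")) = true := by
        simp only [pvCondB, Bool.and_eq_true] at hc; exact hc.2
      have ht : pvTruthyO (some (PySem.Str.strip (PySem.List.pyGetD row x.1 ""))) = true := by
        simpa [pvTruthyO] using hne
      rw [List.foldl_cons, List.find?_cons_of_pos hc]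
      have hstep : pvG row kws none x = some (PySem.Str.strip (PySem.List.pyGetD row x.1 "")) := by
        simp [pvG, hc, pvTruthyO]
      rw [hstep, pvG_frozen _ _ _ _ ht]; rfl
    · rw [List.foldl_cons, List.find?_cons_of_neg (by simp [hc])]
      have hstep : pvG row kws none x = none := by simp [pvG, hc]
      rw [hstep, ih]

theorem pvNE_strip_of_empty (c : String) (h : pvNE c = false) :
    pvNE (PySem.Str.strip c) = false := by
  have : c.toList = [] := by simpa [pvNE] using h
  simp [pvNE, PySem.Str.strip, this]
  rfl

theorem pvNE_and_strip (c : String) :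
    (pvNE c && pvNE (PySem.Str.strip c)) = pvNE (PySem.Str.strip c) := by
  cases h : pvNE c
  · simp [pvNE_strip_of_empty c h]
  · simp

theorem pvFindNameA_eq (row : List String) :
    pvFindNameA row = (row.find? (fun c => pvNE (PySem.Str.strip c))).map PySem.Str.strip := by
  induction row with
  | nil => rfl
  | cons c t ih =>
    simp only [pvFindNameA, pvNE_and_strip, List.find?_cons]
    by_cases h : pvNE (PySem.Str.strip c) = true <;> simp [h, ih]

-- the amount-fallback cell test shared by both fallback characterisations
def pvAmtCellB (c : String) : Bool :=
  PySem.Str.isIn "%" (PySem.Str.strip c) || PySem.Str.isIn "$" (PySem.Str.strip c) ||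
  (PySem.Str.strip c).toList.any PySem.Chars.isdigit

theorem pvFindAmtA_eq (row : List String) :
    pvFindAmtA row = (row.find? pvAmtCellB).map PySem.Str.strip := by
  induction row with
  | nil => rfl
  | cons c t ih =>
    cases hcond : (PySem.Str.isIn "%" (PySem.Str.strip c) || PySem.Str.isIn "$" (PySem.Str.strip c) ||
        (PySem.Str.strip c).toList.any PySem.Chars.isdigit) <;>
      simp only [pvFindAmtA, pvAmtCellB, List.find?_cons, hcond] <;> simp [ih]

theorem pv_enum_ge {α : Type} (l : List α) (s : Int) :
    ∀ p ∈ PySem.List.enumerate l s, s ≤ p.1 := by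
  intro p hp
  rw [PySem.List.mem_enumerate_iff] at hp
  obtain ⟨k, hk, rfl⟩ := hp
  show s ≤ s + (k : Int)
  omega

theorem pvGetD_cons_shift (c : String) (rt : List String) (i : Int) (hi : 0 ≤ i) (d : String) :
    PySem.List.pyGetD (c :: rt) (i + 1) d = PySem.List.pyGetD rt i d := by
  obtain ⟨n, rfl⟩ := Int.eq_ofNat_of_zero_le hi
  have h1 : ((n : Int) + 1) = ((n + 1 : Nat) : Int) := by push_cast; ring
  rw [h1, PySem.List.pyGetD_natCast, PySem.List.pyGetD_natCast]
  rfl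

theorem pv_find?_enumerate_shift {α : Type} (l : List α) (s : Int) (P Q : Int × α → Bool)
    (h : ∀ i x, s ≤ i → P (i + 1, x) = Q (i, x)) :
    (PySem.List.enumerate l (s + 1)).find? P =
      ((PySem.List.enumerate l s).find? Q).map (fun p => (p.1 + 1, p.2)) := by
  induction l generalizing s with
  | nil => rfl
  | cons x t ih =>
    rw [PySem.List.enumerate_cons, PySem.List.enumerate_cons]
    cases hq : Q (s, x) with
    | true =>
      rw [List.find?_cons_of_pos (by rw [h s x le_rfl]; exact hq),
        List.find?_cons_of_pos hq]; rfl
    | false =>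
      rw [List.find?_cons_of_neg (by rw [h s x le_rfl]; simp [hq]),
        List.find?_cons_of_neg (by simp [hq])]
      have := ih (s + 1) (fun i x hi => h i x (by omega))
      simpa using this

theorem pvNE_of_strip (c : String) (h : pvNE (PySem.Str.strip c) = true) : pvNE c = true := by
  cases hc : pvNE c
  · rw [pvNE_strip_of_empty c hc] at h; exact absurd h (by simp)
  · rfl

-- A's header-loop first match, characterised as the parallel walk
theorem pvWalkA (kws : List String) (headers : List String) : ∀ row : List String,
    ((PySem.List.enumerate headers 0).find? (pvCondB row kws)).map
      (fun p => PySem.Str.strip (PySem.List.pyGetD row p.1 "")) = pvWalk kws row headers := by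
  induction headers with
  | nil => intro row; cases row <;> rfl
  | cons h ht ih =>
    intro row
    cases row with
    | nil =>
      rw [List.find?_eq_none.mpr]
      · rfl
      · intro p _
        have hget : PySem.List.pyGetD ([] : List String) p.1 "" = "" := by
          simp [PySem.List.pyGetD, PySem.List.pyGet?]
        simp [pvCondB, hget, pvNE]
    | cons c rt =>
      rw [PySem.List.enumerate_cons]
      have hc0 : pvCondB (c :: rt) kws (0, h) =
          (pvNE (PySem.Str.strip c) && kws.any (fun k => PySem.Str.isIn k (PySem.Str.lower h))) := by
        simp only [pvCondB, PySem.List.pyGetD_zero_cons]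
        have hd : decide ((0 : Int) < (((c :: rt).length : Int))) = true := by simp
        rw [hd]
        cases hs : pvNE (PySem.Str.strip c)
        · simp
        · simp [pvNE_of_strip c hs]
      by_cases hcond : (pvNE (PySem.Str.strip c) &&
          kws.any (fun k => PySem.Str.isIn k (PySem.Str.lower h))) = true
      · rw [List.find?_cons_of_pos (by rw [hc0]; exact hcond)]
        simp only [Option.map_some, PySem.List.pyGetD_zero_cons]
        rw [pvWalk, if_pos hcond]
      · rw [List.find?_cons_of_neg (by rw [hc0]; simp_all)]
        have hshift : (PySem.List.enumerate ht (0 + 1)).find? (pvCondB (c :: rt) kws) =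
            ((PySem.List.enumerate ht 0).find? (pvCondB rt kws)).map (fun p => (p.1 + 1, p.2)) := by
          apply pv_find?_enumerate_shift
          intro i x hi
          simp only [pvCondB, pvGetD_cons_shift c rt i hi]
          have hd : (decide ((i + 1) < (((c :: rt).length : Int)))) =
              (decide (i < ((rt.length : Int)))) := by
            simp only [List.length_cons]
            rw [decide_eq_decide]
            push_cast; omega
          rw [hd]
        rw [hshift, Option.map_map]
        rw [pvWalk, if_neg hcond]
        rw [← ih rt]
        cases hf : (PySem.List.enumerate ht 0).find? (pvCondB rt kws) with
        | none => rfl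
        | some p =>
          have hmem := List.mem_of_find?_eq_some hf
          have hp0 : (0 : Int) ≤ p.1 := pv_enum_ge ht 0 p hmem
          simp only [Option.map_some, Function.comp]
          rw [pvGetD_cons_shift c rt p.1 hp0]

-- B's header-candidate first match, characterised as the same walk
theorem pvWalkB (kws : List String) (row : List String) : ∀ headers : List String,
    ((PySem.List.enumerate row 0).find? (pvCondB' headers kws)).map
      (fun p => PySem.Str.strip p.2) = pvWalk kws row headers := by
  induction row with
  | nil => intro headers; cases headers <;> rfl
  | cons c rt ih =>
    intro headers
    cases headers with
    | nil =>
      rw [List.find?_eq_none.mpr]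
      · rfl
      · intro p hp
        have hp0 := pv_enum_ge (c :: rt) 0 p hp
        have hd : decide (p.1 < ((([] : List String).length : Int))) = false := by
          apply decide_eq_false
          simp
          omega
        simp [pvCondB']
        intro _ h2
        exact absurd h2 (by omega)
    | cons h ht =>
      rw [PySem.List.enumerate_cons]
      have hc0 : pvCondB' (h :: ht) kws (0, c) =
          (pvNE (PySem.Str.strip c) && kws.any (fun k => PySem.Str.isIn k (PySem.Str.lower h))) := by
        simp only [pvCondB', PySem.List.pyGetD_zero_cons]
        have hd : decide ((0 : Int) < (((h :: ht).length : Int))) = true := by simp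
        rw [hd]
        simp
      by_cases hcond : (pvNE (PySem.Str.strip c) &&
          kws.any (fun k => PySem.Str.isIn k (PySem.Str.lower h))) = true
      · rw [List.find?_cons_of_pos (by rw [hc0]; exact hcond)]
        simp only [Option.map_some]
        rw [pvWalk, if_pos hcond]
      · rw [List.find?_cons_of_neg (by rw [hc0]; simp_all)]
        have hshift : (PySem.List.enumerate rt (0 + 1)).find? (pvCondB' (h :: ht) kws) =
            ((PySem.List.enumerate rt 0).find? (pvCondB' ht kws)).map (fun p => (p.1 + 1, p.2)) := by
          apply pv_find?_enumerate_shift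
          intro i x hi
          simp only [pvCondB', pvGetD_cons_shift h ht i hi]
          have hd : (decide ((i + 1) < (((h :: ht).length : Int)))) =
              (decide (i < ((ht.length : Int)))) := by
            simp only [List.length_cons]
            rw [decide_eq_decide]
            push_cast; omega
          rw [hd]
        rw [hshift, Option.map_map]
        rw [pvWalk, if_neg hcond]
        rw [← ih ht]
        rfl

-- "set if None" fold = first match
theorem pv_setIfNone_frozen {α β : Type} (cond : β → Bool) (f : β → α) (l : List β) (a : α) :
    l.foldl (fun o p => if o.isNone && cond p then some (f p) else o) (some a) = some a := by
  induction l with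
  | nil => rfl
  | cons x t ih =>
    rw [List.foldl_cons, if_neg (by simp)]
    exact ih

theorem pv_setIfNone_find {α β : Type} (cond : β → Bool) (f : β → α) (l : List β) :
    l.foldl (fun o p => if o.isNone && cond p then some (f p) else o) none =
      (l.find? cond).map f := by
  induction l with
  | nil => rfl
  | cons x t ih =>
    cases hc : cond x with
    | true =>
      rw [List.foldl_cons, List.find?_cons_of_pos hc]
      simp only [Option.isNone_none, hc, Bool.and_self, if_pos]
      rw [pv_setIfNone_frozen]; rfl
    | false =>
      rw [List.foldl_cons, List.find?_cons_of_neg (by simp [hc]), ← ih]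
      simp [hc]

theorem pv_find?_enumerate_snd {α : Type} (q : String → Bool) (g : String → α) :
    ∀ (l : List String) (s : Int),
    ((PySem.List.enumerate l s).find? (fun p => q p.2)).map (fun p => g p.2) =
      (l.find? q).map g := by
  intro l
  induction l with
  | nil => intro s; rfl
  | cons x t ih =>
    intro s
    rw [PySem.List.enumerate_cons]
    cases hq : q x with
    | true =>
      rw [List.find?_cons_of_pos (by simpa using hq), List.find?_cons_of_pos hq]
      rfl
    | false =>
      rw [List.find?_cons_of_neg (by simpa using hq),
        List.find?_cons_of_neg (by simp [hq]), ih]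

-- canonical single-slot forms of Source B's five accumulator updates (proof helpers)
def pvU1 (headers : List String) (o : Option String) (p : Int × String) : Option String :=
  if o.isNone && pvCondB' headers pvNameKw p then some (PySem.Str.strip p.2) else o
def pvU2 (headers : List String) (o : Option String) (p : Int × String) : Option String :=
  if o.isNone && pvCondB' headers pvAmtKw p then some (PySem.Str.strip p.2) else o
def pvU3 (o : Option String) (p : Int × String) : Option String :=
  if o.isNone && pvNE (PySem.Str.strip p.2) then some (PySem.Str.strip p.2) else o
def pvU4 (o : Option String) (p : Int × String) : Option String :=
  if o.isNone && pvAmtCellB p.2 then some (PySem.Str.strip p.2) else o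
def pvU5 (headers : List String) (acc : List String) (p : Int × String) : List String :=
  if pvNE (PySem.Str.strip p.2) then
    acc ++ [if decide (p.1 < ((headers.length : Int))) then
              PySem.Str.join "" [PySem.List.pyGetD headers p.1 "", ": ", p.2]
            else p.2]
  else acc

-- B's fused step, componentwise
theorem pvStepB_eq (headers : List String)
    (st : Option String × Option String × Option String × Option String × List String)
    (p : Int × String) :
    pvStepB headers st p =
      (pvU1 headers st.1 p, pvU2 headers st.2.1 p, pvU3 st.2.2.1 p, pvU4 st.2.2.2.1 p,
       pvU5 headers st.2.2.2.2 p) := by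
  obtain ⟨hn, ha, fn, fa, parts⟩ := st
  cases hs : pvNE (PySem.Str.strip p.2) <;>
  cases hd : decide (p.1 < ((headers.length : Int))) <;>
    simp [pvStepB, pvU1, pvU2, pvU3, pvU4, pvU5, pvCondB', pvAmtCellB, hs, hd]

-- a fold over a five-field accumulator splits into five independent folds
theorem pv_foldl_five {α1 α2 α3 α4 α5 β : Type}
    (f1 : α1 → β → α1) (f2 : α2 → β → α2) (f3 : α3 → β → α3) (f4 : α4 → β → α4)
    (f5 : α5 → β → α5) (l : List β) (a1 : α1) (a2 : α2) (a3 : α3) (a4 : α4) (a5 : α5) :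
    l.foldl (fun st p => (f1 st.1 p, f2 st.2.1 p, f3 st.2.2.1 p, f4 st.2.2.2.1 p,
        f5 st.2.2.2.2 p)) (a1, a2, a3, a4, a5) =
      (l.foldl f1 a1, l.foldl f2 a2, l.foldl f3 a3, l.foldl f4 a4, l.foldl f5 a5) := by
  induction l generalizing a1 a2 a3 a4 a5 with
  | nil => rfl
  | cons x t ih => simp [List.foldl_cons, ih]

-- the walk only stores non-empty (stripped) values
theorem pvWalk_ne (kws : List String) : ∀ (row headers : List String) (s : String),
    pvWalk kws row headers = some s → pvNE s = true := by
  intro row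
  induction row with
  | nil => intro headers s h; cases headers <;> simp [pvWalk] at h
  | cons c rt ih =>
    intro headers s h
    cases headers with
    | nil => simp [pvWalk] at h
    | cons hd ht =>
      rw [pvWalk] at h
      by_cases hc : (pvNE (PySem.Str.strip c) &&
          kws.any (fun k => PySem.Str.isIn k (PySem.Str.lower hd))) = true
      · rw [if_pos hc] at h
        simp only [Bool.and_eq_true] at hc
        cases h
        exact hc.1
      · rw [if_neg hc] at h
        exact ih ht s h

-- ===== VERDICT (by name: the statement is the Claim_ definition above) =====
theorem extract_fee_info_from_row_py_spec : Claim_equal_extract_fee_info_from_row_py := by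
  intro row headers _dom
  unfold Spec_extract_fee_info_from_row_py extract_fee_info_from_row_py
    extract_fee_info_from_row_py_alt
  by_cases h : (row.isEmpty || headers.isEmpty) = true
  · simp [h]
  · have h' : (row.isEmpty || headers.isEmpty) = false := by
      cases hx : (row.isEmpty || headers.isEmpty)
      · rfl
      · exact absurd hx h
    have hh : headers.isEmpty = false := by
      cases hz : headers.isEmpty
      · rfl
      · rw [hz] at h'; simp at h'
    -- decompose B's fused fold into five independent folds and characterise each
    have h5 := pv_foldl_five (pvU1 headers) (pvU2 headers) pvU3 pvU4 (pvU5 headers)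
      (PySem.List.enumerate row 0) none none none none []
    have hfoldB : (PySem.List.enumerate row 0).foldl (pvStepB headers)
        (none, none, none, none, []) =
        (pvWalk pvNameKw row headers,
         pvWalk pvAmtKw row headers,
         (row.find? (fun c => pvNE (PySem.Str.strip c))).map PySem.Str.strip,
         (row.find? pvAmtCellB).map PySem.Str.strip,
         pvDescA headers row) := by
      rw [pvFoldlFunext _ _ _ _ (pvStepB_eq headers), h5]
      simp only [Prod.mk.injEq]
      refine ⟨?_, ?_, ?_, ?_, ?_⟩
      · unfold pvU1
        rw [pv_setIfNone_find, pvWalkB]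
      · unfold pvU2
        rw [pv_setIfNone_find, pvWalkB]
      · unfold pvU3
        rw [pv_setIfNone_find]
        exact pv_find?_enumerate_snd (fun c => pvNE (PySem.Str.strip c)) PySem.Str.strip row 0
      · unfold pvU4
        rw [pv_setIfNone_find]
        exact pv_find?_enumerate_snd pvAmtCellB PySem.Str.strip row 0
      · unfold pvDescA
        apply pvFoldlFunext
        intro acc p
        rw [pvNE_and_strip]
        cases hs : pvNE (PySem.Str.strip p.2)
        · simp [pvU5, hs]
        · simp [pvU5, hs, hh]
    -- A's header fold as the two walks
    have hfoldA : (PySem.List.enumerate headers 0).foldl (pvStepA row) (none, none) =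
        (pvWalk pvNameKw row headers, pvWalk pvAmtKw row headers) := by
      rw [pvFoldlFunext _ _ _ _ (fun st p => pvStepA_eq row st p), foldl_pair,
        pvG_find, pvG_find, pvWalkA, pvWalkA]
    simp only [h, Bool.false_eq_true, if_false, hfoldA, hfoldB, pvFindNameA_eq, pvFindAmtA_eq]
    -- reconcile the truthiness test with the isSome test on each walk result
    have hsel : ∀ (kws : List String) (fb : Option String),
        (if pvTruthyO (pvWalk kws row headers) then pvWalk kws row headers else fb) =
        (if (pvWalk kws row headers).isSome then pvWalk kws row headers else fb) := by
      intro kws fb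
      cases hw : pvWalk kws row headers with
      | none => rfl
      | some s =>
        have := pvWalk_ne kws row headers s hw
        simp [pvTruthyO, this]
    rw [hsel, hsel]
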